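-- pv_equiv track=rewrite | github.com/Abhinavrana42016/NLTK_python_IR | Dictionary file/dictionaryandpfile.py | createTweetDict
-- ===== SOURCE A (Python) =====
-- def createTweetDict(inputDict):
--     Dict = {}
--     II = {}
--     for Key, Text in inputDict.items():
--         for word in Text.lower().split():
--             II[word] = II.get(word,0)+1
--             if Dict.get(word,False):
--                 if Key not in Dict[word]:
--                     Dict[word].append(Key)
--             else:
--                 Dict[word] = [Key]
--     return Dict, II
-- ===== SOURCE B (Python) =====
-- def createTweetDict(inputDict):
--     Dict = {}
--     II = {}
--     for Key, Text in inputDict.items():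
--         words = Text.lower().split()
--         for word in words:
--             II[word] = II.get(word, 0) + 1
--         for word in dict.fromkeys(words):
--             Dict.setdefault(word, []).append(Key)
--     return Dict, II
-- ===== Notes on version B (the rewrite author's own statement) =====
-- stated objective: faster
-- what changed: B splits A's single fused loop into two passes per tweet and eliminates A's per-word posting-list membership scan ('Key not in Dict[word]') and its truthiness branching, instead appending each dict key once per distinct word via dict.fromkeys + setdefault.
import Mathlib
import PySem

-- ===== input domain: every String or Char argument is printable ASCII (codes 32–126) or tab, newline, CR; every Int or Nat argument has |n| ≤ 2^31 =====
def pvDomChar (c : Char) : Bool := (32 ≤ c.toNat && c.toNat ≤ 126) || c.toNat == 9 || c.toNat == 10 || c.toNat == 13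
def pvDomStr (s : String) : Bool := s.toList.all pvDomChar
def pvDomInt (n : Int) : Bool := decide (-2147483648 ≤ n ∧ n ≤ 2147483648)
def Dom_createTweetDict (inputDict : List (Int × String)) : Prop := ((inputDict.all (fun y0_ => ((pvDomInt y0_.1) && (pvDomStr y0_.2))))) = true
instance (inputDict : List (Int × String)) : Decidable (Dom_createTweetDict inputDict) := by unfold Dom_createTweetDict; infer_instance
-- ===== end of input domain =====

-- B replaces A's per-word posting-list membership scan by a pass over the tweet's distinct
-- words (dict.fromkeys), appending each tweet key once per word (measured faster; same result).
-- The Python parameter is a dict; its List (Int × String) representation is taken through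
-- PySem.Dict.ofList in both ports (= Python's dict construction), so both ports iterate the
-- dict's items exactly as the Python code does.

-- ===== PORT A =====
def createTweetDict (inputDict : List (Int × String)) : (List (String × List Int)) × (List (String × Int)) :=
  let st := ((PySem.Dict.ofList inputDict).items).foldl
    (fun (st : PySem.Dict String (List Int) × PySem.Dict String Int) kv =>
      -- for word in Text.lower().split():
      (PySem.Str.split₀ (PySem.Str.lower kv.2)).foldl
        (fun st word =>
          -- II[word] = II.get(word,0)+1
          let II := st.2.insert word (st.2.getD word 0 + 1)
          -- if Dict.get(word,False): (truthy = present with a nonempty list)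
          match st.1.get? word with
          | some lst =>
              if lst = [] then (st.1.insert word [kv.1], II)      -- falsy: Dict[word] = [Key]
              else if kv.1 ∈ lst then (st.1, II)                  -- Key already in posting list
              else (st.1.insert word (lst ++ [kv.1]), II)         -- Dict[word].append(Key)
          | none => (st.1.insert word [kv.1], II))
        st)
    (PySem.Dict.empty, PySem.Dict.empty)
  (st.1.items, st.2.items)

-- ===== PORT B =====
def createTweetDict_alt (inputDict : List (Int × String)) : (List (String × List Int)) × (List (String × Int)) :=
  let st := ((PySem.Dict.ofList inputDict).items).foldl
    (fun (st : PySem.Dict String (List Int) × PySem.Dict String Int) kv =>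
      let words := PySem.Str.split₀ (PySem.Str.lower kv.2)
      -- for word in words: II[word] = II.get(word, 0) + 1
      let II := words.foldl (fun d w => d.insert w (d.getD w 0 + 1)) st.2
      -- for word in dict.fromkeys(words): Dict.setdefault(word, []).append(Key)
      -- (setdefault+append is exactly PySem.Dict.modify word [] (· ++ [Key]))
      let D := (PySem.List.dedup words).foldl (fun d w => d.modify w [] (· ++ [kv.1])) st.1
      (D, II))
    (PySem.Dict.empty, PySem.Dict.empty)
  (st.1.items, st.2.items)

-- ===== PRECONDITION & SPEC =====
def Spec_createTweetDict (inputDict : List (Int × String)) (out : (List (String × List Int)) × (List (String × Int))) : Prop := out = createTweetDict_alt inputDict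
instance (inputDict : List (Int × String)) (out : (List (String × List Int)) × (List (String × Int))) : Decidable (Spec_createTweetDict inputDict out) := by unfold Spec_createTweetDict; infer_instance

-- ===== CLAIM (what is proved, stated in full; the proofs are below) =====
def Claim_equal_createTweetDict : Prop := ∀ (inputDict : List (Int × String)), Dom_createTweetDict inputDict → Spec_createTweetDict inputDict (createTweetDict inputDict)

-- ===== LEMMAS AND PROOFS =====

def pvAstepD (K : Int) (d : PySem.Dict String (List Int)) (w : String) : PySem.Dict String (List Int) :=
  match d.get? w with
  | some lst =>
      if lst = [] then d.insert w [K]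
      else if K ∈ lst then d
      else d.insert w (lst ++ [K])
  | none => d.insert w [K]

def pvBstepD (K : Int) (d : PySem.Dict String (List Int)) (w : String) : PySem.Dict String (List Int) :=
  d.modify w [] (· ++ [K])

lemma pvAstepD_eq (K : Int) (d : PySem.Dict String (List Int)) (w : String) :
    pvAstepD K d w = if K ∈ d.getD w [] then d else pvBstepD K d w := by
  unfold pvAstepD pvBstepD PySem.Dict.modify
  cases h : d.get? w with
  | none =>
      simp [PySem.Dict.getD_of_get?_eq_none d _ h]
  | some lst =>
      rw [PySem.Dict.getD_of_get?_eq_some d _ h]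
      rcases eq_or_ne lst [] with rfl | hne
      · simp
      · by_cases hK : K ∈ lst
        · simp [hne, hK]
        · simp [hne, hK]

lemma pvDedupAux1 {α : Type} [BEq α] [LawfulBEq α] (w : α) (xs : List α) :
    ∀ (s : PySem.Set α), w ∈ s →
      xs.foldl PySem.Set.add s = (xs.filter (fun x => !(x == w))).foldl PySem.Set.add s := by
  induction xs with
  | nil => intro s _; rfl
  | cons x xs ih =>
      intro s hs
      by_cases hxw : x = w
      · subst hxw
        have hadd : PySem.Set.add s x = s := by
          simp [PySem.Set.add, hs]
        simp only [List.foldl_cons, List.filter_cons, beq_self_eq_true, Bool.not_true,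
          hadd]
        exact ih s hs
      · have hmem : w ∈ PySem.Set.add s x := by
          simp only [PySem.Set.add]; split <;> simp [hs]
        simp only [List.foldl_cons, List.filter_cons,
          show (!(x == w)) = true by simp [hxw], if_true]
        exact ih _ hmem

lemma pvDedupAux2 {α : Type} [BEq α] [LawfulBEq α] (w : α) (ys : List α) (hw : w ∉ ys) :
    ∀ (s : PySem.Set α), ys.foldl PySem.Set.add (w :: s) = w :: ys.foldl PySem.Set.add s := by
  induction ys with
  | nil => intro s; rfl
  | cons y ys ih =>
      intro s
      have hyw : y ≠ w := by rintro rfl; simp at hw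
      have hw' : w ∉ ys := fun h => hw (List.mem_cons_of_mem _ h)
      have hadd : PySem.Set.add (w :: s) y = w :: PySem.Set.add s y := by
        simp only [PySem.Set.add]
        by_cases h : y ∈ s <;> simp [h, hyw]
      simp only [List.foldl_cons, hadd]
      exact ih hw' _

lemma pvDedup_cons {α : Type} [BEq α] [LawfulBEq α] (w : α) (xs : List α) :
    PySem.List.dedup (w :: xs) = w :: PySem.List.dedup (xs.filter (fun x => !(x == w))) := by
  have h1 : PySem.List.dedup (w :: xs) = xs.foldl PySem.Set.add ([w] : PySem.Set α) := by
    simp [PySem.List.dedup, PySem.Set.ofList, PySem.Set.add, PySem.Set.empty, PySem.Set.contains]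
  rw [h1, pvDedupAux1 w xs [w] (by simp)]
  have h2 := pvDedupAux2 w (xs.filter (fun x => !(x == w))) (by simp) ([] : PySem.Set α)
  simpa [PySem.List.dedup, PySem.Set.ofList, PySem.Set.empty] using h2

def pvCstep (d : PySem.Dict String Int) (w : String) : PySem.Dict String Int :=
  d.insert w (d.getD w 0 + 1)

lemma pvInner (K : Int) (words : List String) : ∀ (D : PySem.Dict String (List Int)),
    words.foldl (pvAstepD K) D
      = (PySem.List.dedup (words.filter (fun w => !(decide (K ∈ D.getD w []))))).foldl (pvBstepD K) D := by
  induction words with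
  | nil => intro D; rfl
  | cons w ws ih =>
      intro D
      by_cases hK : K ∈ D.getD w []
      · have hA : pvAstepD K D w = D := by rw [pvAstepD_eq]; simp [hK]
        simp only [List.foldl_cons, hA, List.filter_cons,
          show (!(decide (K ∈ D.getD w []))) = false by simp [hK], if_neg Bool.false_ne_true]
        exact ih D
      · have hA : pvAstepD K D w = pvBstepD K D w := by rw [pvAstepD_eq]; simp [hK]
        have hKw : K ∈ (pvBstepD K D w).getD w [] := by
          simp [pvBstepD, PySem.Dict.getD_modify_self]
        have hfilter : ws.filter (fun w' => !(decide (K ∈ (pvBstepD K D w).getD w' [])))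
            = (ws.filter (fun w' => !(decide (K ∈ D.getD w' [])))).filter (fun x => !(x == w)) := by
          rw [List.filter_filter]
          apply List.filter_congr
          intro x _
          by_cases hxw : x = w
          · subst hxw; simp [hKw]
          · simp [pvBstepD, PySem.Dict.getD_modify_of_ne _ _ _ hxw, hxw]
        simp only [List.foldl_cons, hA, List.filter_cons,
          show (!(decide (K ∈ D.getD w []))) = true by simp [hK], if_true]
        rw [pvDedup_cons, List.foldl_cons, ih (pvBstepD K D w), hfilter]

lemma pvGetD_after (K : Int) (ws : List String) (D : PySem.Dict String (List Int)) (w : String) (x : Int)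
    (hx : x ∈ (ws.foldl (pvBstepD K) D).getD w []) : x ∈ D.getD w [] ∨ x = K := by
  have hrw : ws.foldl (pvBstepD K) D
      = (ws.map (fun w => (w, K))).foldl (fun d p => d.modify p.1 [] (· ++ [p.2])) D := by
    rw [List.foldl_map]; rfl
  rw [hrw, PySem.Dict.getD_foldl_modify_append] at hx
  rcases List.mem_append.1 hx with h | h
  · exact Or.inl h
  · right
    rcases List.mem_map.1 h with ⟨p, hp, rfl⟩
    rcases List.mem_filter.1 hp with ⟨hp', _⟩
    rcases List.mem_map.1 hp' with ⟨w', _, rfl⟩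
    rfl

lemma pvTweet (K : Int) (T : String) (D : PySem.Dict String (List Int)) (II : PySem.Dict String Int)
    (hfresh : ∀ w, K ∉ D.getD w []) :
    ((PySem.Str.split₀ (PySem.Str.lower T)).foldl
        (fun (st : PySem.Dict String (List Int) × PySem.Dict String Int) word =>
          let II := st.2.insert word (st.2.getD word 0 + 1)
          match st.1.get? word with
          | some lst =>
              if lst = [] then (st.1.insert word [K], II)
              else if K ∈ lst then (st.1, II)
              else (st.1.insert word (lst ++ [K]), II)
          | none => (st.1.insert word [K], II)) (D, II))
      = ((PySem.List.dedup (PySem.Str.split₀ (PySem.Str.lower T))).foldl (pvBstepD K) D,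
         (PySem.Str.split₀ (PySem.Str.lower T)).foldl pvCstep II) := by
  have hstep : (fun (st : PySem.Dict String (List Int) × PySem.Dict String Int) word =>
          let II := st.2.insert word (st.2.getD word 0 + 1)
          match st.1.get? word with
          | some lst =>
              if lst = [] then (st.1.insert word [K], II)
              else if K ∈ lst then (st.1, II)
              else (st.1.insert word (lst ++ [K]), II)
          | none => (st.1.insert word [K], II))
      = (fun st word => (pvAstepD K st.1 word, pvCstep st.2 word)) := by
    funext st word
    simp only [pvAstepD, pvCstep]
    cases h : st.1.get? word
    · rfl
    · simp only []
      split_ifs <;> rfl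
  rw [hstep, PySem.List.foldl_prod_mk, pvInner]
  have : (PySem.Str.split₀ (PySem.Str.lower T)).filter (fun w => !(decide (K ∈ D.getD w []))) 
      = PySem.Str.split₀ (PySem.Str.lower T) := by
    apply List.filter_eq_self.2
    intro a _
    simp [hfresh a]
  rw [this]

lemma pvOuter (l : List (Int × String)) : ∀ (D : PySem.Dict String (List Int)) (II : PySem.Dict String Int),
    (l.map (·.1)).Nodup →
    (∀ p ∈ l, ∀ w, p.1 ∉ D.getD w []) →
    l.foldl
      (fun (st : PySem.Dict String (List Int) × PySem.Dict String Int) kv =>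
        (PySem.Str.split₀ (PySem.Str.lower kv.2)).foldl
          (fun st word =>
            let II := st.2.insert word (st.2.getD word 0 + 1)
            match st.1.get? word with
            | some lst =>
                if lst = [] then (st.1.insert word [kv.1], II)
                else if kv.1 ∈ lst then (st.1, II)
                else (st.1.insert word (lst ++ [kv.1]), II)
            | none => (st.1.insert word [kv.1], II)) st) (D, II)
      = l.foldl
          (fun (st : PySem.Dict String (List Int) × PySem.Dict String Int) kv =>
            let words := PySem.Str.split₀ (PySem.Str.lower kv.2)
            let II := words.foldl (fun d w => d.insert w (d.getD w 0 + 1)) st.2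
            let D := (PySem.List.dedup words).foldl (fun d w => d.modify w [] (· ++ [kv.1])) st.1
            (D, II)) (D, II) := by
  induction l with
  | nil => intro D II _ _; rfl
  | cons kv l ih =>
      intro D II hnd hfresh
      simp only [List.foldl_cons]
      have ht := pvTweet kv.1 kv.2 D II (hfresh kv (List.mem_cons_self) )
      rw [ht]
      refine ih _ _ (List.nodup_cons.1 hnd).2 ?_
      intro p hp w hmem
      rcases pvGetD_after kv.1 _ D w p.1 hmem with h | h
      · exact hfresh p (List.mem_cons_of_mem _ hp) w h
      · refine (List.nodup_cons.1 hnd).1 ?_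
        have := List.mem_map_of_mem (f := (·.1)) hp
        rw [show (fun (x : Int × String) => x.1) p = p.1 from rfl, h] at this
        exact this

-- ===== VERDICT (by name: the statement is the Claim_ definition above) =====
theorem createTweetDict_spec : Claim_equal_createTweetDict := by
  intro inputDict _
  unfold Spec_createTweetDict createTweetDict createTweetDict_alt
  have h := pvOuter (PySem.Dict.ofList inputDict).items PySem.Dict.empty PySem.Dict.empty
    (by have := PySem.Dict.nodup_keys_ofList (κ := Int) (ν := String) inputDict; simpa [PySem.Dict.keys] using this)
    (by intro p _ w; simp [PySem.Dict.getD_empty])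
  simp only [h]
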